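-- pv_equiv track=rewrite | github.com/hail-is/hail | batch/batch/worker/copy.py | contains_wildcard
-- ===== SOURCE A (Python) =====
-- wildcards = ('*', '?', '[', ']', '{', '}')
--
-- def contains_wildcard(c):
--     i = 0
--     n = len(c)
--     while i < n:
--         if i < n - 1 and c[i] == '\\' and c[i + 1] in wildcards:
--             i += 2
--             continue
--         if c[i] in wildcards:
--             return True
--         i += 1
--     return False
-- ===== SOURCE B (Python) =====
-- wildcards = ('*', '?', '[', ']', '{', '}')
--
-- def contains_wildcard(c):
--     # Pass 1: strip escaped wildcards with a one-boolean state machine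
--     # (no index arithmetic, no lookahead). Pass 2: membership test.
--     cleaned = []
--     prev_backslash = False
--     for ch in c:
--         if prev_backslash and ch in wildcards:
--             cleaned.pop()  # drop the escaping backslash; the wildcard is escaped
--             prev_backslash = False
--         else:
--             cleaned.append(ch)
--             prev_backslash = ch == '\\'
--     return any(ch in wildcards for ch in cleaned)
-- ===== Notes on version B (the rewrite author's own statement) =====
-- stated objective: simpler
-- what changed: replaces A's index-based lookahead scan with early return by a two-pass decomposition: a state-machine pass (one boolean, no index arithmetic) that strips escaped wildcards into a cleaned list, then an any() membership test over the cleaned list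
import Mathlib
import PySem

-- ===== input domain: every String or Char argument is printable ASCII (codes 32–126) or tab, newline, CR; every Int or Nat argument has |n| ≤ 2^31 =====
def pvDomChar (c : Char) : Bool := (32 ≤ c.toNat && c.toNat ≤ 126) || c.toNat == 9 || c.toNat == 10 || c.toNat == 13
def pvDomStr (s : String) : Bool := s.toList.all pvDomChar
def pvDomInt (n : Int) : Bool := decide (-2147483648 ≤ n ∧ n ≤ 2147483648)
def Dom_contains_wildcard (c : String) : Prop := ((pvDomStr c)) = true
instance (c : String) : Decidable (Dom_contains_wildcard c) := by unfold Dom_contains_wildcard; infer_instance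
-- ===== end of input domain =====

-- B replaces A's index/lookahead scan with two passes (strip escaped wildcards via a
-- state machine, then a membership test); objective: simpler decomposition, same O(n) cost.

-- ===== PORT A =====
-- wildcards = ('*', '?', '[', ']', '{', '}')
def pvIsWild (ch : Char) : Bool := ch ∈ ['*', '?', '[', ']', '{', '}']

-- the while loop over index i: 'a :: b :: rest' is the state with c[i] = a, c[i+1] = b
-- (the 'i < n - 1' guard is the two-element pattern), 'i += 2' drops both, 'i += 1' drops one
def pvScanA : List Char → Bool
  | [] => false
  | [a] => if pvIsWild a then true else false
  | a :: b :: rest =>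
      if a = '\\' && pvIsWild b then pvScanA rest
      else if pvIsWild a then true
      else pvScanA (b :: rest)

def contains_wildcard (c : String) : Bool := pvScanA c.toList

-- ===== PORT B =====
-- one step of B's for-loop: state = (cleaned in reverse, prev_backslash)
def pvCleanStep (s : List Char × Bool) (ch : Char) : List Char × Bool :=
  if s.2 && pvIsWild ch then (s.1.tail, false)   -- cleaned.pop(): drop the escaping backslash
  else (ch :: s.1, ch = '\\')                    -- cleaned.append(ch)

def contains_wildcard_alt (c : String) : Bool :=
  let r := c.toList.foldl pvCleanStep ([], false)
  (r.1.reverse).any pvIsWild                     -- any(ch in wildcards for ch in cleaned)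

-- ===== PRECONDITION & SPEC =====
def Spec_contains_wildcard (c : String) (out : Bool) : Prop := out = contains_wildcard_alt c
instance (c : String) (out : Bool) : Decidable (Spec_contains_wildcard c out) := by unfold Spec_contains_wildcard; infer_instance

-- ===== CLAIM (what is proved, stated in full; the proofs are below) =====
def Claim_equal_contains_wildcard : Prop := ∀ (c : String), Dom_contains_wildcard c → Spec_contains_wildcard c (contains_wildcard c)

-- ===== LEMMAS AND PROOFS =====

theorem pvCleanStep_false (acc : List Char) (ch : Char) :
    pvCleanStep (acc, false) ch = (ch :: acc, decide (ch = '\\')) := by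
  simp [pvCleanStep]

theorem pvCleanStep_true_wild (acc : List Char) (ch : Char) (h : pvIsWild ch = true) :
    pvCleanStep (acc, true) ch = (acc.tail, false) := by
  simp [pvCleanStep, h]

theorem pvCleanStep_true_not (acc : List Char) (ch : Char) (h : pvIsWild ch = false) :
    pvCleanStep (acc, true) ch = (ch :: acc, decide (ch = '\\')) := by
  simp [pvCleanStep, h]

-- fold invariant, both pending states at once:
-- from pending=false the cleaned list gains a wildcard iff the A-scan fires;
-- from pending=true the head of cleaned is the pending backslash.
theorem pvClean_invariant (l : List Char) :
    (∀ acc : List Char,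
        ((l.foldl pvCleanStep (acc, false)).1.any pvIsWild)
          = (acc.any pvIsWild || pvScanA l)) ∧
    (∀ acc : List Char,
        ((l.foldl pvCleanStep ('\\' :: acc, true)).1.any pvIsWild)
          = (acc.any pvIsWild || pvScanA ('\\' :: l))) := by
  induction l with
  | nil =>
      constructor
      · intro acc; simp [pvScanA]
      · intro acc; simp [pvScanA, pvIsWild]
  | cons b rest ih =>
      obtain ⟨ih1, ih2⟩ := ih
      have hbw : pvIsWild '\\' = false := by decide
      constructor
      · intro acc
        rw [List.foldl_cons, pvCleanStep_false]
        by_cases hb : b = '\\'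
        · subst hb
          rw [decide_eq_true rfl, ih2 acc]
        · rw [decide_eq_false hb, ih1 (b :: acc)]
          by_cases hw : pvIsWild b
          · cases rest with
            | nil => simp [pvScanA, hw]
            | cons x xs => simp [pvScanA, hb, hw]
          · cases rest with
            | nil => simp [pvScanA, hw]
            | cons x xs => simp [pvScanA, hb, hw]
      · intro acc
        by_cases hw : pvIsWild b
        · rw [List.foldl_cons, pvCleanStep_true_wild _ _ hw, List.tail_cons, ih1 acc]
          simp [pvScanA, hw]
        · rw [List.foldl_cons, pvCleanStep_true_not _ _ (by simpa using hw)]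
          by_cases hb : b = '\\'
          · subst hb
            rw [decide_eq_true rfl, ih2 ('\\' :: acc)]
            simp [pvScanA, hbw]
          · rw [decide_eq_false hb, ih1 (b :: '\\' :: acc)]
            cases rest with
            | nil => simp [pvScanA, hbw, hw]
            | cons x xs => simp [pvScanA, hbw, hb, hw]

-- ===== VERDICT (by name: the statement is the Claim_ definition above) =====
theorem contains_wildcard_spec : Claim_equal_contains_wildcard := by
  intro c _
  unfold Spec_contains_wildcard contains_wildcard contains_wildcard_alt
  rw [List.any_reverse, (pvClean_invariant c.toList).1 []]
  simp
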